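-- pv_equiv track=rewrite | github.com/imgwho/cwtwb | src/cwtwb/authoring_run.py | _contract_worksheet_names
-- ===== SOURCE A (Python) =====
-- from typing import Any
--
-- def _contract_worksheet_names(contract: dict[str, Any]) -> list[str]:
--     names: list[str] = []
--     seen: set[str] = set()
--     for worksheet in contract.get("worksheets", []):
--         if not isinstance(worksheet, dict):
--             continue
--         name = str(worksheet.get("name", "")).strip()
--         if not name:
--             continue
--         if name in seen:
--             raise RuntimeError(
--                 f"Contract contains duplicate worksheet name '{name}'. "
--                 "Reopen the contract stage and make worksheet names unique before planning."
--             )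
--         seen.add(name)
--         names.append(name)
--     if not names:
--         raise RuntimeError(
--             "The confirmed contract does not contain any worksheets to plan. "
--             "Reopen the contract stage and add at least one worksheet."
--         )
--     return names
-- ===== SOURCE B (Python) =====
-- def _contract_worksheet_names(contract):
--     cleaned = [
--         n
--         for n in (
--             str(w.get("name", "")).strip()
--             for w in contract.get("worksheets", [])
--             if isinstance(w, dict)
--         )
--         if n
--     ]
--     if len(set(cleaned)) != len(cleaned):
--         dup = next(n for n in cleaned if cleaned.count(n) > 1)
--         raise RuntimeError(
--             f"Contract contains duplicate worksheet name '{dup}'. "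
--             "Reopen the contract stage and make worksheet names unique before planning."
--         )
--     if not cleaned:
--         raise RuntimeError(
--             "The confirmed contract does not contain any worksheets to plan. "
--             "Reopen the contract stage and add at least one worksheet."
--         )
--     return cleaned
-- ===== Notes on version B (the rewrite author's own statement) =====
-- stated objective: alternative
-- what changed: A interleaves cleaning, duplicate detection and accumulation in one loop carrying a seen-set; B builds the cleaned names in one comprehension and then validates the finished list globally: duplicates detected by comparing len(set(cleaned)) to len(cleaned) (naming an offender via count), no incremental seen-set at all.
import Mathlib
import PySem

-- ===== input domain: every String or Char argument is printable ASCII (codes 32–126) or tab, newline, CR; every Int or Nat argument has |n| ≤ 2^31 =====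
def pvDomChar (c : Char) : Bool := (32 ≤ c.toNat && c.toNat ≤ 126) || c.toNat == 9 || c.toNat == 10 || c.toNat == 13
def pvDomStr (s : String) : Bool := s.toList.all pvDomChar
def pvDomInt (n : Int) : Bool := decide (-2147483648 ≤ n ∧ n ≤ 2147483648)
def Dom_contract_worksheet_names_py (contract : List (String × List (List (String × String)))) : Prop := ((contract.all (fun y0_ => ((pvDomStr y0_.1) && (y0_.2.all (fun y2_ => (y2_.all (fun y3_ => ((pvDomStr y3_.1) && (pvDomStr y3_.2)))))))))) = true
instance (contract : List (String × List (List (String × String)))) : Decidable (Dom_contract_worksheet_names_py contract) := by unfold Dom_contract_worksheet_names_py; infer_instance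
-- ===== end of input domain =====

-- B replaces A's single stateful loop (seen-set + accumulator) by one comprehension building the
-- cleaned list and a global count-based validation of the finished list; return values agree on Pre_.
-- Both Pythons RAISE RuntimeError on duplicates / when no non-empty names remain; Pre_ excludes those inputs.

-- ===== PORT A =====
-- worksheet name cleaned as the Python does: str(worksheet.get("name","")).strip()
-- (str(...) is the identity here: values are Strings under the type convention)
def pvWsName (w : List (String × String)) : String :=
  PySem.Str.strip ((PySem.Dict.mk w).getD "name" "")

-- A's loop over the worksheets, carrying names and seen.  The duplicate branch is a
-- 'raise' in Python (excluded by Pre_); the port returns the accumulator there.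
def pvALoop : List (List (String × String)) → List String → PySem.Set String → List String
  | [], names, _ => names
  | w :: rest, names, seen =>
    let name := pvWsName w
    if name = "" then pvALoop rest names seen
    else if PySem.Set.contains seen name then names  -- Python: raise RuntimeError (duplicate)
    else pvALoop rest (names ++ [name]) (PySem.Set.add seen name)

def contract_worksheet_names_py (contract : List (String × List (List (String × String)))) : List String :=
  -- the final 'if not names: raise' is an exception path, excluded by Pre_
  pvALoop ((PySem.Dict.mk contract).getD "worksheets" []) [] PySem.Set.empty

-- ===== PORT B =====
-- B: comprehension building the cleaned list (the isinstance test is always true under the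
-- type convention), then the global count-based validation (both checks raise-only in Python,
-- hence excluded by Pre_), then return the cleaned list.
def contract_worksheet_names_py_alt (contract : List (String × List (List (String × String)))) : List String :=
  let cleaned :=
    ((((PySem.Dict.mk contract).getD "worksheets" []).map
        (fun w => PySem.Str.strip ((PySem.Dict.mk w).getD "name" "")))).filter
      (fun n => n ≠ "")
  cleaned

-- ===== PRECONDITION & SPEC =====
-- Pre_ excludes exactly the inputs where the Python A raises RuntimeError: a duplicate among
-- the cleaned non-empty worksheet names, or no such name at all.
def Pre_contract_worksheet_names_py (contract : List (String × List (List (String × String)))) : Prop :=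
  let cleaned :=
    ((((PySem.Dict.mk contract).getD "worksheets" []).map
        (fun w => PySem.Str.strip ((PySem.Dict.mk w).getD "name" "")))).filter
      (fun n => n ≠ "")
  cleaned ≠ [] ∧ cleaned.Nodup
instance (contract : List (String × List (List (String × String)))) : Decidable (Pre_contract_worksheet_names_py contract) := by unfold Pre_contract_worksheet_names_py; infer_instance

def pvWitness_contract_worksheet_names_py : (List (String × List (List (String × String)))) :=
  [("worksheets", [[("name", " a ")], [("name", "")], [("name", "b")]])]

def Spec_contract_worksheet_names_py (contract : List (String × List (List (String × String)))) (out : List String) : Prop := out = contract_worksheet_names_py_alt contract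
instance (contract : List (String × List (List (String × String)))) (out : List String) : Decidable (Spec_contract_worksheet_names_py contract out) := by unfold Spec_contract_worksheet_names_py; infer_instance

-- ===== CLAIM (what is proved, stated in full; the proofs are below) =====
def Claim_equal_contract_worksheet_names_py : Prop := ∀ (contract : List (String × List (List (String × String)))), Dom_contract_worksheet_names_py contract → Pre_contract_worksheet_names_py contract → Spec_contract_worksheet_names_py contract (contract_worksheet_names_py contract)

-- ===== LEMMAS AND PROOFS =====

-- A's loop equals names ++ cleaned ws, provided nothing of cleaned ws is in seen and cleaned ws has no duplicates.
lemma pvALoop_eq (ws : List (List (String × String))) :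
    ∀ (names : List String) (seen : PySem.Set String),
      (∀ n ∈ (ws.map pvWsName).filter (fun n => n ≠ ""), PySem.Set.contains seen n = false) →
      ((ws.map pvWsName).filter (fun n => n ≠ "")).Nodup →
      pvALoop ws names seen = names ++ (ws.map pvWsName).filter (fun n => n ≠ "") := by
  induction ws with
  | nil => intro names seen _ _; simp [pvALoop]
  | cons w rest ih =>
    intro names seen hseen hnd
    by_cases h : pvWsName w = ""
    · simp only [List.map_cons, List.filter_cons, h] at hseen hnd ⊢
      simpa [pvALoop, h] using ih names seen (by simpa using hseen) (by simpa using hnd)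
    · have hmem : pvWsName w ∈ ((w :: rest).map pvWsName).filter (fun n => n ≠ "") := by
        simp [h]
      have hc := hseen _ hmem
      simp only [List.map_cons, List.filter_cons_of_pos (p := fun n => decide (n ≠ ""))
        (by simpa using h)] at hseen hnd
      have hnotmem : pvWsName w ∉ (rest.map pvWsName).filter (fun n => n ≠ "") :=
        (List.nodup_cons.mp hnd).1
      have hseen' : ∀ n ∈ (rest.map pvWsName).filter (fun n => n ≠ ""),
          PySem.Set.contains (PySem.Set.add seen (pvWsName w)) n = false := by
        intro n hn
        have hne : n ≠ pvWsName w := fun he => hnotmem (he ▸ hn)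
        have h0 := hseen n (List.mem_cons_of_mem _ hn)
        simp only [PySem.Set.contains, PySem.Set.add] at h0 ⊢
        split
        · exact h0
        · simp_all
      have := ih (names ++ [pvWsName w]) (PySem.Set.add seen (pvWsName w)) hseen'
        (List.nodup_cons.mp hnd).2
      simp only [pvALoop, h, hc, if_false]
      rw [this]
      simp [h]

-- ===== VERDICT (by name: the statement is the Claim_ definition above) =====
theorem contract_worksheet_names_py_spec : Claim_equal_contract_worksheet_names_py := by
  intro contract _ hpre
  obtain ⟨_, hnd⟩ := hpre
  unfold Spec_contract_worksheet_names_py contract_worksheet_names_py contract_worksheet_names_py_alt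
  rw [pvALoop_eq _ [] PySem.Set.empty (by intro n _; rfl) hnd]
  rfl
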